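-- pv_equiv track=rewrite | github.com/ShenDezhou/LSTM2 | B256-E60-F5-PU-Bi-Bn-De.py | getNgram
-- ===== SOURCE A (Python) =====
-- def safea(sentence, i):
--     if i < 0:
--         return '\n'
--     if i >= len(sentence):
--         return '\n'
--     return sentence[i]
--
-- def getNgram(sentence, i):
--     #5 + 4*2 + 2*3=19
--     ngrams = []
--     for offset in [-2, -1, 0, 1, 2]:
--         ngrams.append(safea(sentence, i + offset))
--
--     for offset in [-2, -1, 0, 1]:
--         ngrams.append(safea(sentence, i + offset) + safea(sentence, i + offset + 1))
--
--     for offset in [-1, 0]: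
--         ngrams.append(safea(sentence, i + offset) + safea(sentence, i + offset + 1) + safea(sentence, i + offset + 2))
--     return ngrams
-- ===== SOURCE B (Python) =====
-- def getNgram(sentence, i):
--     # Pad the sentence with 5 '\n' on each side, clamp i into the range where
--     # behaviour can still vary, then read every n-gram as a plain slice of the
--     # padded string: no per-character boundary checks at all.
--     n = len(sentence)
--     j = min(max(i, -3), n + 2)          # positions outside [-3, n+2] all behave alike
--     pad = '\n' * 5 + sentence + '\n' * 5
--     k = j + 5                            # pad index of sentence position j
--     out = list(pad[k - 2:k + 3])         # 5 unigrams
--     out += [pad[k - 2 + t:k + t] for t in range(4)]   # 4 bigrams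
--     out += [pad[k - 1:k + 2], pad[k:k + 3]]           # 2 trigrams
--     return out
-- ===== Notes on version B (the rewrite author's own statement) =====
-- stated objective: alternative
-- what changed: B replaces A's 19 boundary-checked character accessor calls across three append loops by building one '\n'-padded copy of the sentence, clamping i, and reading every n-gram as a contiguous slice of the padded string.
import Mathlib
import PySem

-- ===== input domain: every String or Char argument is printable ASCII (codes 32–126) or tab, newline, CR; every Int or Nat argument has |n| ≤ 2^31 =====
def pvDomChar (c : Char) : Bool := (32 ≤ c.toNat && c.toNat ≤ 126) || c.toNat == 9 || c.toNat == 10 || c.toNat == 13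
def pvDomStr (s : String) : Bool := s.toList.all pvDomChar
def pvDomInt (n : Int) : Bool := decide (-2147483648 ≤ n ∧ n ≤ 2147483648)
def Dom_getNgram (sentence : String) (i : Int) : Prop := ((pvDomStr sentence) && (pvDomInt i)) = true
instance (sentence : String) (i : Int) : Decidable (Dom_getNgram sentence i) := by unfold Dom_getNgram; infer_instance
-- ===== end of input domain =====

-- B builds one '\n'-padded copy of the sentence, clamps i, and reads every n-gram as a
-- contiguous slice of it, instead of A's 19 boundary-checked accessor calls. Objective: alternative.

-- ===== PORT A =====
-- shared module helper safea, on the character list (returns a 1-char list, '\n' out of range)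
def safeaCh (s : List Char) (i : Int) : List Char :=
  if i < 0 then ['\n']
  else if i ≥ PySem.List.len s then ['\n']
  else [PySem.List.pyGetD s i '\n']   -- guarded in range, so pyGetD is exact here

def getNgram (sentence : String) (i : Int) : List String :=
  let s := sentence.toList
  let ngrams : List String := []
  let ngrams := [(-2 : Int), -1, 0, 1, 2].foldl
    (fun acc o => acc ++ [String.ofList (safeaCh s (i + o))]) ngrams
  let ngrams := [(-2 : Int), -1, 0, 1].foldl
    (fun acc o => acc ++ [String.ofList (safeaCh s (i + o) ++ safeaCh s (i + o + 1))]) ngrams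
  let ngrams := [(-1 : Int), 0].foldl
    (fun acc o => acc ++ [String.ofList (safeaCh s (i + o) ++ safeaCh s (i + o + 1) ++ safeaCh s (i + o + 2))]) ngrams
  ngrams

-- ===== PORT B =====
def getNgram_alt (sentence : String) (i : Int) : List String :=
  let s := sentence.toList
  let n : Int := PySem.List.len s
  let j := min (max i (-3)) (n + 2)                                -- j = min(max(i, -3), n + 2)
  let pad := List.replicate 5 '\n' ++ s ++ List.replicate 5 '\n'   -- pad = '\n'*5 + sentence + '\n'*5
  let k := j + 5
  let out := (PySem.List.slice pad (some (k - 2)) (some (k + 3))).map (fun c => String.ofList [c])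
  let out := out ++ (PySem.List.pyRange 0 4 1).map
    (fun t => String.ofList (PySem.List.slice pad (some (k - 2 + t)) (some (k + t))))
  let out := out ++ [String.ofList (PySem.List.slice pad (some (k - 1)) (some (k + 2))),
                     String.ofList (PySem.List.slice pad (some k) (some (k + 3)))]
  out

-- ===== PRECONDITION & SPEC =====
def Spec_getNgram (sentence : String) (i : Int) (out : List String) : Prop := out = getNgram_alt sentence i
instance (sentence : String) (i : Int) (out : List String) : Decidable (Spec_getNgram sentence i out) := by unfold Spec_getNgram; infer_instance

-- ===== CLAIM (what is proved, stated in full; the proofs are below) =====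
def Claim_equal_getNgram : Prop := ∀ (sentence : String) (i : Int), Dom_getNgram sentence i → Spec_getNgram sentence i (getNgram sentence i)

-- ===== LEMMAS AND PROOFS =====

-- proof-side description of the padded list: its character at Int index q
def padc (s : List Char) (q : Int) : Char :=
  if q < 5 ∨ (s.length : Int) + 5 ≤ q then '\n' else s.getD (q - 5).toNat '\n'

theorem padc_getD (s : List Char) (q : Nat) :
    (List.replicate 5 '\n' ++ s ++ List.replicate 5 '\n').getD q '\n' = padc s (q : Int) := by
  unfold padc
  rw [List.getD_eq_getElem?_getD]
  rcases lt_or_ge q 5 with h | h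
  · rw [if_pos (by omega)]
    rw [List.append_assoc, List.getElem?_append_left (by simpa using h),
       List.getElem?_replicate]
    rw [if_pos h]; rfl
  · rw [List.append_assoc, List.getElem?_append_right (by simpa using h)]
    simp only [List.length_replicate]
    rcases lt_or_ge (q - 5) s.length with h2 | h2
    · rw [if_neg (by omega), List.getElem?_append_left h2]
      rw [List.getElem?_eq_getElem h2]
      simp only [Option.getD_some]
      rw [List.getD_eq_getElem?_getD, List.getElem?_eq_getElem (by omega)]
      simp only [Option.getD_some]
      congr 1
      omega
    · rw [if_pos (by omega), List.getElem?_append_right h2]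
      have : (List.replicate 5 '\n')[q - 5 - s.length]?.getD '\n' = '\n' := by
        rw [List.getElem?_replicate]
        split <;> rfl
      exact this

theorem seg_take_drop (xs : List Char) (p m : Nat) (h : p + m ≤ xs.length) :
    (xs.drop p).take m = (List.range m).map (fun t => xs.getD (p + t) '\n') := by
  induction m generalizing p with
  | zero => simp
  | succ m ih =>
    have hp : p < xs.length := by omega
    rw [List.drop_eq_getElem_cons hp, List.range_succ_eq_map]
    simp only [List.take_succ_cons, List.map_cons, List.map_map]
    refine List.cons_eq_cons.mpr ⟨?_, ?_⟩
    · rw [Nat.add_zero, List.getD_eq_getElem?_getD, List.getElem?_eq_getElem hp]; rfl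
    · rw [ih (p+1) (by omega)]
      apply List.map_congr_left
      intro t _
      simp only [Function.comp]
      congr 1
      omega

theorem slice_pad (s : List Char) (a : Int) (m : Nat) (h0 : 0 ≤ a)
    (h1 : a + m ≤ (s.length : Int) + 10) :
    PySem.List.slice (List.replicate 5 '\n' ++ s ++ List.replicate 5 '\n')
      (some a) (some (a + m)) = (List.range m).map (fun (t : Nat) => padc s (a + (t : Int))) := by
  have hlen : (List.replicate 5 '\n' ++ s ++ List.replicate 5 '\n').length = s.length + 10 := by
    simp
  rw [PySem.List.slice_toNat _ h0 (by omega)]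
  have hm : (a + m).toNat - a.toNat = m := by omega
  rw [hm, seg_take_drop _ _ _ (by omega)]
  apply List.map_congr_left
  intro t _
  rw [padc_getD]
  congr 1
  omega

theorem safea_padc (s : List Char) (i o : Int) (ho : -2 ≤ o ∧ o ≤ 2) :
    safeaCh s (i + o) = [padc s (min (max i (-3)) ((s.length : Int) + 2) + o + 5)] := by
  unfold safeaCh padc
  simp only [PySem.List.len_eq]
  rcases lt_or_ge (i + o) 0 with h1 | h1
  · rw [if_pos h1, if_pos (by omega)]
  · rw [if_neg (by omega)]
    rcases lt_or_ge (i + o) (s.length : Int) with h2 | h2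
    swap
    · rw [if_pos (by omega), if_pos (by omega)]
    · rw [if_neg (by omega), if_neg (by omega)]
      rw [PySem.List.pyGetD_eq_getElem _ _ h1 (by simpa using h2)]
      have hj : min (max i (-3)) ((s.length : Int) + 2) = i := by omega
      rw [hj]
      have harg : (i + o + 5 - 5).toNat = (i + o).toNat := by omega
      rw [harg, List.getD_eq_getElem?_getD, List.getElem?_eq_getElem (by omega)]
      rfl

-- ===== VERDICT (by name: the statement is the Claim_ definition above) =====
theorem getNgram_spec : Claim_equal_getNgram := by
  intro sentence i _
  show getNgram sentence i = getNgram_alt sentence i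
  unfold getNgram getNgram_alt
  simp only [List.foldl, List.nil_append, PySem.List.len_eq]
  set s := sentence.toList with hs
  set j := min (max i (-3)) ((s.length : Int) + 2) with hj
  have hj3 : -3 ≤ j ∧ j ≤ (s.length : Int) + 2 := by
    constructor <;> omega
  have S : ∀ (a : Int) (m : Nat) (b : Int), 0 ≤ a → a + m ≤ (s.length : Int) + 10 → b = a + m →
      PySem.List.slice (List.replicate 5 '\n' ++ s ++ List.replicate 5 '\n') (some a) (some b)
        = (List.range m).map (fun (t : Nat) => padc s (a + (t : Int))) := by
    intro a m b h0 h1 hb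
    rw [hb]; exact slice_pad s a m h0 h1
  rw [S (j + 5 - 2) 5 (j + 5 + 3) (by omega) (by omega) (by push_cast; ring)]
  rw [S (j + 5 - 1) 3 (j + 5 + 2) (by omega) (by omega) (by push_cast; ring)]
  rw [S (j + 5) 3 (j + 5 + 3) (by omega) (by omega) (by push_cast; ring)]
  have hr4 : PySem.List.pyRange 0 4 1 = [0, 1, 2, 3] := by decide
  rw [hr4]
  simp only [List.map]
  rw [S (j + 5 - 2 + 0) 2 (j + 5 + 0) (by omega) (by omega) (by push_cast; ring)]
  rw [S (j + 5 - 2 + 1) 2 (j + 5 + 1) (by omega) (by omega) (by push_cast; ring)]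
  rw [S (j + 5 - 2 + 2) 2 (j + 5 + 2) (by omega) (by omega) (by push_cast; ring)]
  rw [S (j + 5 - 2 + 3) 2 (j + 5 + 3) (by omega) (by omega) (by push_cast; ring)]
  have hr5 : List.range 5 = [0, 1, 2, 3, 4] := by decide
  have hr3 : List.range 3 = [0, 1, 2] := by decide
  have hr2 : List.range 2 = [0, 1] := by decide
  rw [hr5, hr3, hr2]
  simp only [List.map]
  have A : ∀ (o : Int), -2 ≤ o ∧ o ≤ 2 → safeaCh s (i + o) = [padc s (j + o + 5)] := by
    intro o ho; rw [hj]; exact safea_padc s i o ho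
  rw [show i + -2 + 1 = i + (-1) from by ring, show i + -1 + 1 = i + 0 from by ring,
      show i + 0 + 1 = i + 1 from by ring, show i + 1 + 1 = i + 2 from by ring,
      show i + -1 + 2 = i + 1 from by ring, show i + 0 + 2 = i + 2 from by ring]
  rw [A (-2) (by omega), A (-1) (by omega), A 0 (by omega), A 1 (by omega), A 2 (by omega)]
  simp only [List.cons_append, List.nil_append]
  norm_num
  ring_nf
  exact ⟨trivial, trivial, trivial, trivial, trivial, trivial, trivial, trivial, trivial, trivial⟩
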